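-- pv_equiv track=rewrite | github.com/ButerBreaGrieneTsiis/platus | src/platus/gegevens/gereedschap.py | jaar_maand_iterator
-- ===== SOURCE A (Python) =====
-- from typing import Iterator
--
-- def jaar_maand_iterator(
--     jaar_start: int,
--     maand_start: int,
--     jaar_eind: int,
--     maand_eind: int,
-- ) -> Iterator[int]:
--
--     jaar_maand_start    =   12*jaar_start + maand_start-1
--     jaar_maand_eind     =   12*jaar_eind + maand_eind-1
--
--     for jaar_maand in range(jaar_maand_start, jaar_maand_eind):
--         jaar, maand = divmod(jaar_maand, 12)
--         yield jaar, maand+1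
-- ===== SOURCE B (Python) =====
-- def jaar_maand_iterator(jaar_start, maand_start, jaar_eind, maand_eind):
--     # normalize both endpoints once, then emit per-year chunks:
--     # partial first year, full middle years, partial last year
--     y1, m1 = divmod(12*jaar_start + maand_start - 1, 12)
--     y2, m2 = divmod(12*jaar_eind + maand_eind - 1, 12)
--     m1 += 1
--     m2 += 1
--     if y1 > y2 or (y1 == y2 and m1 >= m2):
--         return
--     if y1 == y2:
--         yield from ((y1, m) for m in range(m1, m2))
--         return
--     yield from ((y1, m) for m in range(m1, 13))
--     for y in range(y1 + 1, y2):
--         yield from ((y, m) for m in range(1, 13))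
--     yield from ((y2, m) for m in range(1, m2))
-- ===== Notes on version B (the rewrite author's own statement) =====
-- stated objective: alternative
-- what changed: B normalizes both endpoints once and builds the output in per-year chunks (partial first year, full middle years, partial last year) instead of A's single linear scan with a divmod on every month index.
import Mathlib
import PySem

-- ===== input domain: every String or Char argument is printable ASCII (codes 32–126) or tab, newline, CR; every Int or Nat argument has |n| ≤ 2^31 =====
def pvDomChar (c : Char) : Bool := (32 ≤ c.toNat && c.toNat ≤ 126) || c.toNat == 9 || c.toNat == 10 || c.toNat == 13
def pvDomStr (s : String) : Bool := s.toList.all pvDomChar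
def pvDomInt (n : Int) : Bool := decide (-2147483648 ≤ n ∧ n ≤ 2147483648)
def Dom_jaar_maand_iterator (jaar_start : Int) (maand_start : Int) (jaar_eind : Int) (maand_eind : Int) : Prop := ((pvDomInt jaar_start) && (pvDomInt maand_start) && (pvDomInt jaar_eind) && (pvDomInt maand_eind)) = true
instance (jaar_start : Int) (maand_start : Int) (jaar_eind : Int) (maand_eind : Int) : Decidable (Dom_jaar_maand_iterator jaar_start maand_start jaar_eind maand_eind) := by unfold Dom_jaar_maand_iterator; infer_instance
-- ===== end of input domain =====

-- B builds the output in per-year chunks (partial first year, full middle years,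
-- partial last year) instead of A's linear scan with a divmod per month index
-- (objective: alternative decomposition).

-- ===== PORT A =====
-- A: a generator; ported as the list of yielded (jaar, maand) pairs.
def jaar_maand_iterator (jaar_start : Int) (maand_start : Int) (jaar_eind : Int) (maand_eind : Int) : List (Int × Int) :=
  let jaar_maand_start := 12*jaar_start + maand_start - 1
  let jaar_maand_eind := 12*jaar_eind + maand_eind - 1
  (PySem.List.pyRange jaar_maand_start jaar_maand_eind 1).map
    (fun jaar_maand => (PySem.Int.floordiv jaar_maand 12, PySem.Int.mod jaar_maand 12 + 1))

-- ===== PORT B =====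
-- '((y, m) for m in range(a, b))' of Source B
def jmChunk (y a b : Int) : List (Int × Int) :=
  (PySem.List.pyRange a b 1).map (fun m => (y, m))

def jaar_maand_iterator_alt (jaar_start : Int) (maand_start : Int) (jaar_eind : Int) (maand_eind : Int) : List (Int × Int) :=
  let y1 := PySem.Int.floordiv (12*jaar_start + maand_start - 1) 12
  let m1 := PySem.Int.mod (12*jaar_start + maand_start - 1) 12 + 1
  let y2 := PySem.Int.floordiv (12*jaar_eind + maand_eind - 1) 12
  let m2 := PySem.Int.mod (12*jaar_eind + maand_eind - 1) 12 + 1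
  if y1 > y2 ∨ (y1 = y2 ∧ m1 ≥ m2) then []
  else if y1 = y2 then jmChunk y1 m1 m2
  else jmChunk y1 m1 13
       ++ (PySem.List.pyRange (y1+1) y2 1).flatMap (fun y => jmChunk y 1 13)
       ++ jmChunk y2 1 m2

-- ===== PRECONDITION & SPEC =====
def Spec_jaar_maand_iterator (jaar_start : Int) (maand_start : Int) (jaar_eind : Int) (maand_eind : Int) (out : List (Int × Int)) : Prop := out = jaar_maand_iterator_alt jaar_start maand_start jaar_eind maand_eind
instance (jaar_start : Int) (maand_start : Int) (jaar_eind : Int) (maand_eind : Int) (out : List (Int × Int)) : Decidable (Spec_jaar_maand_iterator jaar_start maand_start jaar_eind maand_eind out) := by unfold Spec_jaar_maand_iterator; infer_instance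

-- ===== CLAIM =====
def Claim_equal_jaar_maand_iterator : Prop := ∀ (jaar_start : Int) (maand_start : Int) (jaar_eind : Int) (maand_eind : Int), Dom_jaar_maand_iterator jaar_start maand_start jaar_eind maand_eind → Spec_jaar_maand_iterator jaar_start maand_start jaar_eind maand_eind (jaar_maand_iterator jaar_start maand_start jaar_eind maand_eind)

-- ===== LEMMAS AND PROOFS =====

-- A's per-index map, abbreviated
def amap (s e : Int) : List (Int × Int) :=
  (PySem.List.pyRange s e 1).map
    (fun x => (PySem.Int.floordiv x 12, PySem.Int.mod x 12 + 1))

lemma amap_append {s m e : Int} (h1 : s ≤ m) (h2 : m ≤ e) :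
    amap s e = amap s m ++ amap m e := by
  unfold amap; rw [PySem.List.pyRange_one_append s m e h1 h2, List.map_append]

-- within one year: A's map over [12y+a-1, 12y+b-1) is B's chunk
lemma amap_chunk (y : Int) (b : Int) (hb : b ≤ 13) :
    ∀ (n : Nat) (a : Int), 1 ≤ a → a + n = b →
    amap (12*y + a - 1) (12*y + b - 1) = jmChunk y a b := by
  intro n
  induction n with
  | zero =>
      intro a ha hab
      have : b ≤ a := by omega
      unfold amap jmChunk
      rw [PySem.List.pyRange_one_eq_nil (by omega), PySem.List.pyRange_one_eq_nil (by omega)]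
      simp
  | succ n ih =>
      intro a ha hab
      have hlt : a < b := by omega
      unfold amap jmChunk
      rw [PySem.List.pyRange_one_cons (by omega : 12*y + a - 1 < 12*y + b - 1),
          PySem.List.pyRange_one_cons hlt, List.map_cons, List.map_cons]
      have hd : PySem.Int.floordiv (12*y + a - 1) 12 = (12*y + a - 1) / 12 :=
        PySem.Int.floordiv_eq_ediv_of_pos (by norm_num)
      have hm : PySem.Int.mod (12*y + a - 1) 12 = (12*y + a - 1) % 12 :=
        PySem.Int.mod_eq_emod_of_pos (by norm_num)
      have e1 : (12*y + a - 1) / 12 = y := by omega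
      have e2 : (12*y + a - 1) % 12 = a - 1 := by omega
      have htail := ih (a+1) (by omega) (by omega)
      unfold amap jmChunk at htail
      have harg : 12*y + a - 1 + 1 = 12*y + (a+1) - 1 := by ring
      rw [harg, htail, hd, hm, e1, e2]
      norm_num

-- full consecutive years: A's map over [12y, 12Y) is the flatMap of full chunks
lemma amap_full_years : ∀ (n : Nat) (y Y : Int), y + n = Y →
    amap (12*y) (12*Y) = (PySem.List.pyRange y Y 1).flatMap (fun t => jmChunk t 1 13) := by
  intro n
  induction n with
  | zero =>
      intro y Y h
      unfold amap
      rw [PySem.List.pyRange_one_eq_nil (by omega : 12*Y ≤ 12*y),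
          PySem.List.pyRange_one_eq_nil (by omega : Y ≤ y)]
      simp
  | succ n ih =>
      intro y Y h
      have hsplit := amap_append (s := 12*y) (m := 12*(y+1)) (e := 12*Y)
        (by omega) (by omega)
      have hchunk := amap_chunk y 13 (by omega) 12 1 (by omega) (by omega)
      have harg1 : 12*y + 1 - 1 = 12*y := by ring
      have harg2 : 12*y + 13 - 1 = 12*(y+1) := by ring
      rw [harg1, harg2] at hchunk
      rw [hsplit, hchunk, ih (y+1) Y (by omega)]
      rw [PySem.List.pyRange_one_cons (by omega : y < Y), List.flatMap_cons]

-- ===== VERDICT =====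
theorem jaar_maand_iterator_spec : Claim_equal_jaar_maand_iterator := by
  intro js ms je me _
  unfold Spec_jaar_maand_iterator jaar_maand_iterator jaar_maand_iterator_alt
  show amap (12*js + ms - 1) (12*je + me - 1) = _
  set s := 12*js + ms - 1 with hs
  set e := 12*je + me - 1 with he
  have hds : PySem.Int.floordiv s 12 = s / 12 := PySem.Int.floordiv_eq_ediv_of_pos (by norm_num)
  have hms : PySem.Int.mod s 12 = s % 12 := PySem.Int.mod_eq_emod_of_pos (by norm_num)
  have hde : PySem.Int.floordiv e 12 = e / 12 := PySem.Int.floordiv_eq_ediv_of_pos (by norm_num)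
  have hme : PySem.Int.mod e 12 = e % 12 := PySem.Int.mod_eq_emod_of_pos (by norm_num)
  rw [hds, hms, hde, hme]
  have hsd : s = 12 * (s/12) + (s % 12 + 1) - 1 := by omega
  have hed : e = 12 * (e/12) + (e % 12 + 1) - 1 := by omega
  have hmb1 : 0 ≤ s % 12 ∧ s % 12 < 12 := by omega
  have hmb2 : 0 ≤ e % 12 ∧ e % 12 < 12 := by omega
  by_cases h1 : e/12 < s/12 ∨ (s/12 = e/12 ∧ e % 12 + 1 ≤ s % 12 + 1)
  · -- empty: e ≤ s
    have hle : e ≤ s := by omega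
    rw [if_pos (by omega)]
    unfold amap; rw [PySem.List.pyRange_one_eq_nil hle]; simp
  · rw [if_neg (by omega)]
    push Not at h1
    by_cases h2 : s/12 = e/12
    · rw [if_pos h2]
      have hlt : s % 12 < e % 12 := by
        have := h1.2 h2; omega
      have := amap_chunk (s/12) (e % 12 + 1) (by omega) (e % 12 - s % 12).toNat
        (s % 12 + 1) (by omega) (by omega)
      rw [← hsd] at this
      have hed' : 12 * (s/12) + (e % 12 + 1) - 1 = e := by omega
      rw [hed'] at this
      exact this
    · rw [if_neg h2]
      have hylt : s/12 < e/12 := by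
        have := h1.1; omega
      -- split A's range at the two year boundaries
      have hb1 : s ≤ 12*(s/12 + 1) := by omega
      have hb2 : 12*(s/12 + 1) ≤ 12*(e/12) := by omega
      have hb3 : 12*(e/12) ≤ e := by omega
      rw [amap_append hb1 (le_trans hb2 hb3),
          amap_append (s := 12*(s/12+1)) hb2 hb3]
      have c1 := amap_chunk (s/12) 13 (by omega) (13 - (s % 12 + 1)).toNat
        (s % 12 + 1) (by omega) (by omega)
      rw [← hsd] at c1
      have harg : 12*(s/12) + 13 - 1 = 12*(s/12 + 1) := by ring
      rw [harg] at c1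
      have c2 := amap_full_years (e/12 - (s/12 + 1)).toNat (s/12 + 1) (e/12) (by omega)
      have c3 := amap_chunk (e/12) (e % 12 + 1) (by omega) (e % 12).toNat 1 (by omega) (by omega)
      have harg1 : 12*(e/12) + 1 - 1 = 12*(e/12) := by ring
      have harg2 : 12*(e/12) + (e % 12 + 1) - 1 = e := by omega
      rw [harg1, harg2] at c3
      rw [c1, c2, c3, List.append_assoc]
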